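-- pv_equiv track=rewrite | github.com/carrickcheah/agentic_bi_system | app/services/service_orchestrator.py | _plan_execution_sequence
-- ===== SOURCE A (Python) =====
-- from typing import Dict, List, Optional, Any
--
-- def _plan_execution_sequence(
--
--     required_services: List[Dict[str, Any]],
--     investigation_strategy: Dict[str, Any]
-- ) -> List[Dict[str, Any]]:
--     """Plan service execution sequence."""
--     # Sort by priority and dependencies
--     high_priority = [s for s in required_services if s.get("priority") == "high"]
--     medium_priority = [s for s in required_services if s.get("priority") == "medium"]
--     low_priority = [s for s in required_services if s.get("priority") == "low"]
--
--     # Create execution sequence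
--     sequence = []
--
--     # Phase 1: Essential services
--     sequence.extend(high_priority)
--
--     # Phase 2: Supporting services
--     sequence.extend(medium_priority)
--
--     # Phase 3: Enhancement services
--     sequence.extend(low_priority)
--
--     return sequence
-- ===== SOURCE B (Python) =====
-- def _plan_execution_sequence(required_services, investigation_strategy):
--     """Plan service execution sequence: one stable sort by a rank table
--     instead of three separate filter passes."""
--     rank = {"high": 0, "medium": 1, "low": 2}
--     eligible = [s for s in required_services if s.get("priority") in rank]
--     return sorted(eligible, key=lambda s: rank[s["priority"]])
-- ===== Notes on version B (the rewrite author's own statement) =====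
-- stated objective: idiomatic
-- what changed: Replaces three priority-filter scans plus concatenation by one filter against a rank table followed by a single stable sort keyed on the rank.
import Mathlib
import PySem

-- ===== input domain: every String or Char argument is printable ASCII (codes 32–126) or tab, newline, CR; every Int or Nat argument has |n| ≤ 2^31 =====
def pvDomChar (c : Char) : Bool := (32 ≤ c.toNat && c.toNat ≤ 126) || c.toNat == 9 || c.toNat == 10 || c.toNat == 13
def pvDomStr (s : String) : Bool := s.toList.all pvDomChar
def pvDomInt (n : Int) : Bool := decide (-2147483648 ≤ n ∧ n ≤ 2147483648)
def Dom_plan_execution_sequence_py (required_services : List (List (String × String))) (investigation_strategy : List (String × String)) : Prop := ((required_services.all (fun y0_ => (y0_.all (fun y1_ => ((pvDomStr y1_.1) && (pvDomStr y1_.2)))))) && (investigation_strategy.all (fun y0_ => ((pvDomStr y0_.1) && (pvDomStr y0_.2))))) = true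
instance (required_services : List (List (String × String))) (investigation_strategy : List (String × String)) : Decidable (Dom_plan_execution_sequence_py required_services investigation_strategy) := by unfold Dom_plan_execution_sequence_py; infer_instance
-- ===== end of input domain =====

-- B replaces A's three priority-filter scans + concatenation by one filter against a rank table and a single stable sort on the rank (idiomatic; similar cost).


-- ===== PORT A =====
-- s.get("priority") on a dict = first-match lookup on the association list: List.lookup
def plan_execution_sequence_py (required_services : List (List (String × String))) (investigation_strategy : List (String × String)) : List (List (String × String)) :=
  let high_priority := required_services.filter (fun s => List.lookup "priority" s == some "high")
  let medium_priority := required_services.filter (fun s => List.lookup "priority" s == some "medium")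
  let low_priority := required_services.filter (fun s => List.lookup "priority" s == some "low")
  let sequence : List (List (String × String)) := []
  let sequence := sequence ++ high_priority
  let sequence := sequence ++ medium_priority
  let sequence := sequence ++ low_priority
  sequence

-- ===== PORT B =====
-- the rank table {"high": 0, "medium": 1, "low": 2}
def pvRank : List (String × Int) := [("high", 0), ("medium", 1), ("low", 2)]
-- 's.get("priority") in rank' = looked-up key present in the rank table
def pvEligible (s : List (String × String)) : Bool :=
  match List.lookup "priority" s with
  | some p => (List.lookup p pvRank).isSome
  | none => false
-- key = rank[s["priority"]]; on the filtered list the lookup always hits, so the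
-- .getD 0 default is never used (Python's KeyError is unreachable there)
def pvKey (s : List (String × String)) : Int :=
  ((List.lookup "priority" s).bind (fun p => List.lookup p pvRank)).getD 0
def plan_execution_sequence_py_alt (required_services : List (List (String × String))) (investigation_strategy : List (String × String)) : List (List (String × String)) :=
  let eligible := required_services.filter pvEligible
  PySem.List.sorted eligible pvKey false

-- ===== PRECONDITION & SPEC =====
def Spec_plan_execution_sequence_py (required_services : List (List (String × String))) (investigation_strategy : List (String × String)) (out : List (List (String × String))) : Prop := out = plan_execution_sequence_py_alt required_services investigation_strategy
instance (required_services : List (List (String × String))) (investigation_strategy : List (String × String)) (out : List (List (String × String))) : Decidable (Spec_plan_execution_sequence_py required_services investigation_strategy out) := by unfold Spec_plan_execution_sequence_py; infer_instance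

-- ===== CLAIM (what is proved, stated in full; the proofs are below) =====
def Claim_equal_plan_execution_sequence_py : Prop := ∀ (required_services : List (List (String × String))) (investigation_strategy : List (String × String)), Dom_plan_execution_sequence_py required_services investigation_strategy → Spec_plan_execution_sequence_py required_services investigation_strategy (plan_execution_sequence_py required_services investigation_strategy)

-- ===== LEMMAS AND PROOFS =====

-- abbreviations for A's three filter tests
def pvPh (s : List (String × String)) : Bool := List.lookup "priority" s == some "high"
def pvPm (s : List (String × String)) : Bool := List.lookup "priority" s == some "medium"
def pvPl (s : List (String × String)) : Bool := List.lookup "priority" s == some "low"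

lemma pvElig_cases (s : List (String × String)) (h : pvEligible s = true) :
    pvPh s = true ∨ pvPm s = true ∨ pvPl s = true := by
  unfold pvEligible at h
  unfold pvPh pvPm pvPl
  cases hl : List.lookup "priority" s with
  | none => simp [hl] at h
  | some p =>
    rw [hl] at h
    by_cases h1 : p = "high"
    · left; simp [hl, h1]
    by_cases h2 : p = "medium"
    · right; left; simp [hl, h2]
    by_cases h3 : p = "low"
    · right; right; simp [hl, h3]
    exfalso
    simp only [pvRank, List.lookup, show (p == "high") = false by simp [h1],
      show (p == "medium") = false by simp [h2], show (p == "low") = false by simp [h3]] at h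
    simp at h

lemma pvKey_of_ph {s : List (String × String)} (h : pvPh s = true) : pvKey s = 0 := by
  unfold pvPh at h; unfold pvKey
  rw [beq_iff_eq] at h; rw [h]; decide
lemma pvKey_of_pm {s : List (String × String)} (h : pvPm s = true) : pvKey s = 1 := by
  unfold pvPm at h; unfold pvKey
  rw [beq_iff_eq] at h; rw [h]; decide
lemma pvKey_of_pl {s : List (String × String)} (h : pvPl s = true) : pvKey s = 2 := by
  unfold pvPl at h; unfold pvKey
  rw [beq_iff_eq] at h; rw [h]; decide

-- insertBy passes over a block of elements it is not to be placed before
lemma insertBy_append {α : Type} (before : α → α → Bool) (x : α) (as bs : List α)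
    (h : ∀ y ∈ as, before x y = false) :
    PySem.List.insertBy before x (as ++ bs) = as ++ PySem.List.insertBy before x bs := by
  induction as with
  | nil => rfl
  | cons a t ih =>
    have ha := h a (by simp)
    simp only [List.cons_append, PySem.List.insertBy, ha]
    simp [ih (fun y hy => h y (by simp [hy]))]

-- insertBy goes to the front of a block it precedes entirely
lemma insertBy_front {α : Type} (before : α → α → Bool) (x : α) (bs : List α)
    (h : ∀ y ∈ bs, before x y = true) :
    PySem.List.insertBy before x bs = x :: bs := by
  cases bs with
  | nil => rfl
  | cons b t => simp [PySem.List.insertBy, h b (by simp)]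

-- insertBy lands at the very end of a block it never precedes
lemma insertBy_last {α : Type} (before : α → α → Bool) (x : α) (bs : List α)
    (h : ∀ y ∈ bs, before x y = false) :
    PySem.List.insertBy before x bs = bs ++ [x] := by
  induction bs with
  | nil => rfl
  | cons b t ih =>
    simp [PySem.List.insertBy, h b (by simp), ih (fun y hy => h y (by simp [hy]))]

-- the insertion-sort fold keeps the three priority blocks, each extended in order
lemma fold_inv (rest : List (List (String × String))) :
    ∀ (H M L : List (List (String × String))),
    (∀ s ∈ H, pvKey s = 0) → (∀ s ∈ M, pvKey s = 1) → (∀ s ∈ L, pvKey s = 2) →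
    (∀ s ∈ rest, pvEligible s = true) →
    rest.foldl (fun acc x => PySem.List.insertBy (fun a b => decide (pvKey a < pvKey b)) x acc) (H ++ M ++ L)
      = (H ++ rest.filter pvPh) ++ (M ++ rest.filter pvPm) ++ (L ++ rest.filter pvPl) := by
  induction rest with
  | nil => intro H M L _ _ _ _; simp
  | cons x t ih =>
    intro H M L hH hM hL he
    have hx := pvElig_cases x (he x (by simp))
    have ht : ∀ s ∈ t, pvEligible s = true := fun s hs => he s (by simp [hs])
    simp only [List.foldl_cons]
    rcases hx with hh | hm | hl
    · have hk := pvKey_of_ph hh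
      have step : PySem.List.insertBy (fun a b => decide (pvKey a < pvKey b)) x (H ++ M ++ L)
          = (H ++ [x]) ++ M ++ L := by
        rw [List.append_assoc,
            insertBy_append _ _ H (M ++ L) (fun y hy => by simp [hk, hH y hy]),
            insertBy_front _ _ (M ++ L) (fun y hy => by
              rcases List.mem_append.mp hy with h' | h'
              · simp [hk, hM y h']
              · simp [hk, hL y h'])]
        simp
      rw [step, ih (H ++ [x]) M L
            (fun s hs => by rcases List.mem_append.mp hs with h' | h'
                            · exact hH s h'
                            · simp at h'; subst h'; exact hk)
            hM hL ht]
      have hfh : (x :: t).filter pvPh = x :: t.filter pvPh := by simp [List.filter, hh]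
      have hfm : (x :: t).filter pvPm = t.filter pvPm := by
        have : pvPm x = false := by
          unfold pvPh at hh; unfold pvPm
          rw [beq_iff_eq] at hh; simp [hh]
        simp [List.filter, this]
      have hfl : (x :: t).filter pvPl = t.filter pvPl := by
        have : pvPl x = false := by
          unfold pvPh at hh; unfold pvPl
          rw [beq_iff_eq] at hh; simp [hh]
        simp [List.filter, this]
      rw [hfh, hfm, hfl]; simp
    · have hk := pvKey_of_pm hm
      have step : PySem.List.insertBy (fun a b => decide (pvKey a < pvKey b)) x (H ++ M ++ L)
          = H ++ (M ++ [x]) ++ L := by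
        rw [List.append_assoc, List.append_assoc,
            insertBy_append _ _ H (M ++ L) (fun y hy => by simp [hk, hH y hy]),
            insertBy_append _ _ M L (fun y hy => by simp [hk, hM y hy]),
            insertBy_front _ _ L (fun y hy => by simp [hk, hL y hy])]
        simp
      rw [step, ih H (M ++ [x]) L hH
            (fun s hs => by rcases List.mem_append.mp hs with h' | h'
                            · exact hM s h'
                            · simp at h'; subst h'; exact hk)
            hL ht]
      have hfm : (x :: t).filter pvPm = x :: t.filter pvPm := by simp [List.filter, hm]
      have hfh : (x :: t).filter pvPh = t.filter pvPh := by
        have : pvPh x = false := by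
          unfold pvPm at hm; unfold pvPh
          rw [beq_iff_eq] at hm; simp [hm]
        simp [List.filter, this]
      have hfl : (x :: t).filter pvPl = t.filter pvPl := by
        have : pvPl x = false := by
          unfold pvPm at hm; unfold pvPl
          rw [beq_iff_eq] at hm; simp [hm]
        simp [List.filter, this]
      rw [hfh, hfm, hfl]; simp
    · have hk := pvKey_of_pl hl
      have step : PySem.List.insertBy (fun a b => decide (pvKey a < pvKey b)) x (H ++ M ++ L)
          = H ++ M ++ (L ++ [x]) := by
        rw [List.append_assoc, List.append_assoc,
            insertBy_append _ _ H (M ++ L) (fun y hy => by simp [hk, hH y hy]),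
            insertBy_append _ _ M L (fun y hy => by simp [hk, hM y hy]),
            insertBy_last _ _ L (fun y hy => by simp [hk, hL y hy])]
      rw [step, ih H M (L ++ [x]) hH hM
            (fun s hs => by rcases List.mem_append.mp hs with h' | h'
                            · exact hL s h'
                            · simp at h'; subst h'; exact hk)
            ht]
      have hfl : (x :: t).filter pvPl = x :: t.filter pvPl := by simp [List.filter, hl]
      have hfh : (x :: t).filter pvPh = t.filter pvPh := by
        have : pvPh x = false := by
          unfold pvPl at hl; unfold pvPh
          rw [beq_iff_eq] at hl; simp [hl]
        simp [List.filter, this]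
      have hfm : (x :: t).filter pvPm = t.filter pvPm := by
        have : pvPm x = false := by
          unfold pvPl at hl; unfold pvPm
          rw [beq_iff_eq] at hl; simp [hl]
        simp [List.filter, this]
      rw [hfh, hfm, hfl]; simp

-- a priority filter commutes with the eligibility filter
lemma filter_elig_p (p : List (String × String) → Bool)
    (himp : ∀ s, p s = true → pvEligible s = true) (l : List (List (String × String))) :
    (l.filter pvEligible).filter p = l.filter p := by
  induction l with
  | nil => rfl
  | cons x t ih =>
    by_cases hp : p x = true
    · simp [List.filter, himp x hp, hp, ih]
    · replace hp : p x = false := by simpa using hp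
      by_cases he : pvEligible x = true <;> simp_all [List.filter]

lemma ph_elig (s : List (String × String)) (h : pvPh s = true) : pvEligible s = true := by
  unfold pvPh at h; rw [beq_iff_eq] at h; unfold pvEligible; rw [h]; decide
lemma pm_elig (s : List (String × String)) (h : pvPm s = true) : pvEligible s = true := by
  unfold pvPm at h; rw [beq_iff_eq] at h; unfold pvEligible; rw [h]; decide
lemma pl_elig (s : List (String × String)) (h : pvPl s = true) : pvEligible s = true := by
  unfold pvPl at h; rw [beq_iff_eq] at h; unfold pvEligible; rw [h]; decide

-- ===== VERDICT (by name: the statement is the Claim_ definition above) =====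
theorem plan_execution_sequence_py_spec : Claim_equal_plan_execution_sequence_py := by
  intro rs strat _
  unfold Spec_plan_execution_sequence_py plan_execution_sequence_py plan_execution_sequence_py_alt
  simp only []
  rw [PySem.List.sorted_eq_foldl_insertBy]
  have h := fold_inv (rs.filter pvEligible) [] [] []
      (by simp) (by simp) (by simp)
      (fun s hs => List.of_mem_filter hs)
  simp only [List.nil_append] at h
  rw [h, filter_elig_p pvPh ph_elig, filter_elig_p pvPm pm_elig, filter_elig_p pvPl pl_elig]
  rfl
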